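-- pv_equiv track=rewrite | github.com/romanSan17/py123 | main.py | logsKuuvamine
-- ===== SOURCE A (Python) =====
-- def logsKuuvamine(logs):
--     jag = 0
--     korr = 0
--     liit = 0
--     lahut = 0
--     for elem in logs:
--         if elem == 'liitumine':
--             liit += 1
--         elif elem == 'lahuta':
--             lahut += 1
--         elif elem == 'umnozh':
--             korr += 1
--         else:
--             jag += 1
--     return [jag, korr, liit, lahut]
-- ===== SOURCE B (Python) =====
-- def logsKuuvamine(logs):
--     # divide and conquer: count-vectors of halves are merged by element-wise addition;
--     # single elements are classified with a slot-index table instead of a branch chain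
--     IDX = {'liitumine': 2, 'lahuta': 3, 'umnozh': 1}
--     n = len(logs)
--     if n == 0:
--         return [0, 0, 0, 0]
--     if n == 1:
--         v = [0, 0, 0, 0]
--         v[IDX.get(logs[0], 0)] = 1
--         return v
--     mid = n // 2
--     left = logsKuuvamine(logs[:mid])
--     right = logsKuuvamine(logs[mid:])
--     return [left[i] + right[i] for i in range(4)]
-- ===== Notes on version B (the rewrite author's own statement) =====
-- stated objective: alternative
-- what changed: Replaces A's single branching accumulator loop with a divide-and-conquer recursion: split the list in half, recursively compute each half's count vector, merge by element-wise addition; single elements are classified via a slot-index dict instead of an if/elif chain.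
import Mathlib
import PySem

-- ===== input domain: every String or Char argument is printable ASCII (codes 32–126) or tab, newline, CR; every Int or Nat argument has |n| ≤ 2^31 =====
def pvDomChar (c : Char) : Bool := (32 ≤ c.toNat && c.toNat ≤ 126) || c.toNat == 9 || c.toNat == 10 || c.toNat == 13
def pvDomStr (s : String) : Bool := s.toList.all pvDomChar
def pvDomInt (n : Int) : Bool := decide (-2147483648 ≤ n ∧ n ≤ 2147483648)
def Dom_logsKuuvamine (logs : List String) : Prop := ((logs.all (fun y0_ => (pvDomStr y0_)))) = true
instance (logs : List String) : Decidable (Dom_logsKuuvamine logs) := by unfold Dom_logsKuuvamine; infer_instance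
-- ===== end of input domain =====

-- ===== PORT A =====
def logsKuuvamine (logs : List String) : List Int :=
  let st := logs.foldl (fun (st : Int × Int × Int × Int) elem =>
    let (jag, korr, liit, lahut) := st
    if elem == "liitumine" then (jag, korr, liit + 1, lahut)
    else if elem == "lahuta" then (jag, korr, liit, lahut + 1)
    else if elem == "umnozh" then (jag, korr + 1, liit, lahut)
    else (jag + 1, korr, liit, lahut)) (0, 0, 0, 0)
  [st.1, st.2.1, st.2.2.1, st.2.2.2]

-- ===== PORT B =====
-- B: divide and conquer — split in half, recurse, merge count vectors by element-wise addition;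
-- single elements classified through a slot-index dict. logs[:mid]/logs[mid:] with 0 ≤ mid ≤ n are
-- exactly take/drop (PySem.List.slice_to_natCast / slice_from_natCast); n // 2 on the Nat length is Python-exact.
def logsKuuvamine_alt (logs : List String) : List Int :=
  let idxTable : PySem.Dict String Int := PySem.Dict.ofList [("liitumine", 2), ("lahuta", 3), ("umnozh", 1)]
  let n := logs.length
  if n = 0 then [0, 0, 0, 0]
  else if n = 1 then
    PySem.List.pySetD [0, 0, 0, 0] (idxTable.getD (PySem.List.pyGetD logs 0 "") 0) (1 : Int)
  else
    let mid := n / 2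
    let left := logsKuuvamine_alt (logs.take mid)
    let right := logsKuuvamine_alt (logs.drop mid)
    (PySem.List.pyRange 0 4 1).map (fun i => PySem.List.pyGetD left i 0 + PySem.List.pyGetD right i 0)
termination_by logs.length
decreasing_by
  · simp [List.length_take]; omega
  · simp [List.length_drop]; omega

-- ===== PRECONDITION & SPEC =====
def Spec_logsKuuvamine (logs : List String) (out : List Int) : Prop := out = logsKuuvamine_alt logs
instance (logs : List String) (out : List Int) : Decidable (Spec_logsKuuvamine logs out) := by unfold Spec_logsKuuvamine; infer_instance

-- ===== CLAIM (what is proved, stated in full; the proofs are below) =====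
def Claim_equal_logsKuuvamine : Prop := ∀ (logs : List String), Dom_logsKuuvamine logs → Spec_logsKuuvamine logs (logsKuuvamine logs)

-- ===== LEMMAS AND PROOFS =====

-- characterisation of B: its result is the count vector (strong induction on the length)
lemma alt_char : ∀ (n : Nat) (logs : List String), logs.length = n →
    logsKuuvamine_alt logs =
    [(logs.length : Int) - logs.count "liitumine" - logs.count "lahuta" - logs.count "umnozh",
     logs.count "umnozh", logs.count "liitumine", logs.count "lahuta"] := by
  intro n
  induction n using Nat.strong_induction_on with
  | _ n ih =>
    intro logs hlen
    rw [logsKuuvamine_alt]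
    by_cases h0 : logs.length = 0
    · obtain rfl := List.length_eq_zero_iff.mp h0
      simp
    by_cases h1 : logs.length = 1
    · obtain ⟨x, rfl⟩ := List.length_eq_one_iff.mp h1
      simp only [if_neg h0, if_pos h1, PySem.List.pyGetD_zero_cons]
      by_cases e1 : x = "liitumine"
      · subst e1; decide
      by_cases e2 : x = "lahuta"
      · subst e2; decide
      by_cases e3 : x = "umnozh"
      · subst e3; decide
      have g1 : ("liitumine" == x) = false := beq_false_of_ne (fun h => e1 h.symm)
      have g2 : ("lahuta" == x) = false := beq_false_of_ne (fun h => e2 h.symm)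
      have g3 : ("umnozh" == x) = false := beq_false_of_ne (fun h => e3 h.symm)
      have hd : (PySem.Dict.ofList [("liitumine", (2:Int)), ("lahuta", 3), ("umnozh", 1)]).getD x 0
          = 0 := by
        simp [PySem.Dict.ofList, PySem.Dict.getD, PySem.Dict.get?, PySem.Dict.empty,
          PySem.Dict.update, PySem.Dict.insert, PySem.Dict.contains, List.find?, g1, g2, g3]
      rw [hd]
      simp only [List.count_cons, List.count_nil, List.length_singleton]
      norm_num [e1, e2, e3]
      decide
    · simp only [if_neg h0, if_neg h1]
      have hmidlt : logs.length / 2 < logs.length := by omega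
      have hl : (logs.take (logs.length / 2)).length < n := by
        simp [List.length_take]; omega
      have hr : (logs.drop (logs.length / 2)).length < n := by
        simp [List.length_drop]; omega
      rw [ih _ hl _ rfl, ih _ hr _ rfl]
      have hsplit : logs.take (logs.length / 2) ++ logs.drop (logs.length / 2) = logs :=
        List.take_append_drop _ _
      have hcount : ∀ w : String, (logs.take (logs.length / 2)).count w
          + (logs.drop (logs.length / 2)).count w = logs.count w := by
        intro w; rw [← List.count_append, hsplit]
      have hlenadd : (logs.take (logs.length / 2)).length + (logs.drop (logs.length / 2)).length
          = logs.length := by rw [← List.length_append, hsplit]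
      have c1 := hcount "liitumine"; have c2 := hcount "lahuta"; have c3 := hcount "umnozh"
      rw [show PySem.List.pyRange 0 4 1 = [0, 1, 2, 3] from by decide]
      simp only [List.map_cons, List.map_nil]
      simp [PySem.List.pyGetD, PySem.List.pyGet?, PySem.List.pyIdx?]
      omega

-- A's loop computes the same count vector
lemma loop_char (logs : List String) (st : Int × Int × Int × Int) :
    logs.foldl (fun (st : Int × Int × Int × Int) elem =>
      let (jag, korr, liit, lahut) := st
      if elem == "liitumine" then (jag, korr, liit + 1, lahut)
      else if elem == "lahuta" then (jag, korr, liit, lahut + 1)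
      else if elem == "umnozh" then (jag, korr + 1, liit, lahut)
      else (jag + 1, korr, liit, lahut)) st =
    (st.1 + ((logs.length : Int) - logs.count "liitumine" - logs.count "lahuta" - logs.count "umnozh"),
     st.2.1 + logs.count "umnozh",
     st.2.2.1 + logs.count "liitumine",
     st.2.2.2 + logs.count "lahuta") := by
  induction logs generalizing st with
  | nil => simp
  | cons x xs ih =>
    obtain ⟨a, b, c, d⟩ := st
    simp only [List.foldl_cons, List.count_cons, ih]
    by_cases h1 : x = "liitumine" <;> by_cases h2 : x = "lahuta" <;> by_cases h3 : x = "umnozh" <;>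
      simp_all
    all_goals first
      | exact ⟨trivial, trivial⟩
      | omega

-- ===== VERDICT (by name: the statement is the Claim_ definition above) =====
theorem logsKuuvamine_spec : Claim_equal_logsKuuvamine := by
  intro logs _
  unfold Spec_logsKuuvamine
  rw [alt_char logs.length logs rfl]
  simp only [logsKuuvamine]
  rw [loop_char]
  simp
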